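-- pv_equiv track=rewrite | github.com/BeAllAround/FreeStyle | Codewars/Data Reverse.py | data_reverse
-- ===== SOURCE A (Python) =====
-- def data_reverse(data):
--     arr, arr1 = [], [];
--     for x in range(0, len(data), 8):
--         arr.append(data[x:x+8])
--     arr.reverse();
--     for item in arr:
--         arr1.extend(item);
--     return arr1;
-- ===== SOURCE B (Python) =====
-- def data_reverse(data):
--     n = len(data)
--     out = [0] * n
--     for i, v in enumerate(data):
--         out[n - min(n, i // 8 * 8 + 8) + i % 8] = v
--     return out
-- ===== Notes on version B (the rewrite author's own statement) =====
-- stated objective: alternative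
-- what changed: B computes the destination index of each element arithmetically (n - min(n, i//8*8 + 8) + i%8) and writes it once into a preallocated output list in a single pass, instead of A's three-step build-chunk-list / reverse / flatten pipeline.
import Mathlib
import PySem

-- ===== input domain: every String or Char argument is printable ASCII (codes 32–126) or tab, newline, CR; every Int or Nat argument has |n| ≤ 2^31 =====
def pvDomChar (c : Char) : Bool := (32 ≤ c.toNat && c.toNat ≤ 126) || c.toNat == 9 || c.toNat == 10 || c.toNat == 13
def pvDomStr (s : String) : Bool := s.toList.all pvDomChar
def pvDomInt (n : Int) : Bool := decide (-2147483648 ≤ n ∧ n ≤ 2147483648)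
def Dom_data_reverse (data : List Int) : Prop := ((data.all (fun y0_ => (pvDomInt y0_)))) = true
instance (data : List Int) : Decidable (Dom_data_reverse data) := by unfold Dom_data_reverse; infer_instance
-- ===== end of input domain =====

-- B replaces A's build-chunk-list / reverse / flatten pipeline by a direct permutation:
-- it preallocates the output and writes each element once at its computed destination index (objective: alternative).


-- ===== PORT A =====
def data_reverse (data : List Int) : List Int :=
  -- arr = []; for x in range(0, len(data), 8): arr.append(data[x:x+8])
  let arr : List (List Int) :=
    (PySem.List.pyRange 0 (data.length : Int) 8).foldl
      (fun a x => a ++ [PySem.List.slice data (some x) (some (x + 8))]) []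
  -- arr.reverse(); arr1 = []; for item in arr: arr1.extend(item)
  let arrR := arr.reverse
  arrR.foldl (fun arr1 item => arr1 ++ item) []

-- ===== PORT B =====
def data_reverse_alt (data : List Int) : List Int :=
  -- n = len(data); out = [0]*n
  -- for i, v in enumerate(data): out[n - min(n, i // 8 * 8 + 8) + i % 8] = v
  let n : Int := (data.length : Int)
  (PySem.List.enumerate data 0).foldl
    (fun out iv =>
      PySem.List.pySetD out (n - min n (PySem.Int.floordiv iv.1 8 * 8 + 8) + PySem.Int.mod iv.1 8) iv.2)
    (List.replicate data.length 0)

-- ===== PRECONDITION & SPEC =====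
def Spec_data_reverse (data : List Int) (out : List Int) : Prop := out = data_reverse_alt data
instance (data : List Int) (out : List Int) : Decidable (Spec_data_reverse data out) := by unfold Spec_data_reverse; infer_instance

-- ===== CLAIM (what is proved, stated in full; the proofs are below) =====
def Claim_equal_data_reverse : Prop := ∀ (data : List Int), Dom_data_reverse data → Spec_data_reverse data (data_reverse data)

-- ===== LEMMAS AND PROOFS =====

-- the common reference value: the 8-chunks of the input, in order
def chunks (l : List Int) : List (List Int) :=
  if h : l = [] then [] else l.take 8 :: chunks (l.drop 8)
termination_by l.length
decreasing_by
  simp only [List.length_drop]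
  have := List.length_pos_iff.mpr h
  omega

-- ---- A side: fold shapes and range(0, n, 8) ----
theorem foldl_append_singleton {α β : Type} (f : α → β) :
    ∀ (xs : List α) (acc : List β), xs.foldl (fun a x => a ++ [f x]) acc = acc ++ xs.map f := by
  intro xs
  induction xs with
  | nil => simp
  | cons y ys ih => intro acc; simp [ih]

theorem foldl_append_self {β : Type} :
    ∀ (xs : List (List β)) (acc : List β), xs.foldl (fun a it => a ++ it) acc = acc ++ xs.flatten := by
  intro xs
  induction xs with
  | nil => simp
  | cons y ys ih => intro acc; simp [ih]

theorem pyRange8_cons_zero (n : Int) (hn : 0 < n) :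
    PySem.List.pyRange 0 n 8 = 0 :: (PySem.List.pyRange 0 (n - 8) 8).map (· + 8) := by
  rw [PySem.List.pyRange_of_pos 0 n (by norm_num), PySem.List.pyRange_of_pos 0 (n - 8) (by norm_num)]
  have hm : (if (0:Int) < n then ((n - 0 + 8 - 1) / 8).toNat else 0)
      = (if (0:Int) < n - 8 then ((n - 8 - 0 + 8 - 1) / 8).toNat else 0) + 1 := by
    split_ifs <;> omega
  rw [hm, List.range_succ_eq_map]
  simp only [List.map_cons, List.map_map]
  rw [List.cons.injEq]
  refine ⟨by norm_num, List.map_congr_left ?_⟩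
  intro k _
  simp only [Function.comp_apply]
  push_cast
  ring

theorem pyRange8_nil (n : Int) (hn : n ≤ 0) : PySem.List.pyRange 0 n 8 = [] := by
  rw [PySem.List.pyRange_of_pos 0 n (by norm_num), if_neg (by omega)]
  simp

theorem slice_head (data : List Int) :
    PySem.List.slice data (some 0) (some (0 + 8)) = data.take 8 := by
  norm_num
  rw [PySem.List.slice_to data (by norm_num)]
  congr 1

theorem mapSlices : ∀ (fuel : Nat) (data : List Int), data.length ≤ fuel →
    (PySem.List.pyRange 0 (data.length : Int) 8).map
      (fun x => PySem.List.slice data (some x) (some (x + 8))) = chunks data := by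
  intro fuel
  induction fuel with
  | zero =>
      intro data h
      have hd : data = [] := List.length_eq_zero_iff.mp (by omega)
      subst hd
      simp [chunks, pyRange8_nil 0 le_rfl]
  | succ fuel ih =>
      intro data h
      by_cases hnil : data = []
      · subst hnil; simp [chunks, pyRange8_nil 0 le_rfl]
      · have hpos : 0 < data.length := List.length_pos_iff.mpr hnil
        rw [pyRange8_cons_zero _ (by exact_mod_cast hpos), List.map_cons, slice_head,
            List.map_map, chunks, dif_neg hnil, List.cons.injEq]
        refine ⟨rfl, ?_⟩
        by_cases h8 : data.length ≤ 8
        · have : ((data.length : Int) - 8) ≤ 0 := by omega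
          rw [pyRange8_nil _ this]
          have : data.drop 8 = [] := List.drop_eq_nil_of_le h8
          rw [this]
          simp [chunks]
        · push_neg at h8
          have hcongr : ∀ x ∈ PySem.List.pyRange 0 ((data.length : Int) - 8) 8,
              ((fun x => PySem.List.slice data (some x) (some (x + 8))) ∘ (· + 8)) x
                = PySem.List.slice (data.drop 8) (some x) (some (x + 8)) := by
            intro x hx
            have hx0 : 0 ≤ x := ((PySem.List.mem_pyRange_iff_of_pos (by norm_num) x).mp hx).1
            simp only [Function.comp_apply]
            rw [PySem.List.slice_toNat data (by omega) (by omega),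
                PySem.List.slice_toNat (data.drop 8) (by omega) (by omega),
                List.drop_drop]
            have h1 : (x + 8).toNat = x.toNat + 8 := by omega
            have h2 : (x + 8 + 8).toNat = x.toNat + 16 := by omega
            rw [h1, h2]
            congr 1
            · omega
            · congr 1; omega
          rw [List.map_congr_left hcongr]
          have hlen : ((data.length : Int) - 8) = ((data.drop 8).length : Int) := by
            simp; omega
          rw [hlen, ih (data.drop 8) (by simp; omega)]

-- ---- B side: sequential writes into a preallocated buffer ----
theorem setSeq : ∀ (c : List Int) (k : Nat) (acc : List Int), k + c.length ≤ acc.length →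
    (PySem.List.enumerate c (k : Int)).foldl (fun o iv => PySem.List.pySetD o iv.1 iv.2) acc
      = acc.take k ++ c ++ acc.drop (k + c.length) := by
  intro c
  induction c with
  | nil =>
      intro k acc hk
      simp [PySem.List.enumerate_nil]
  | cons v c' ih =>
      intro k acc hk
      rw [PySem.List.enumerate_cons, List.foldl_cons]
      have hklen : k < acc.length := by simp at hk; omega
      have hset : PySem.List.pySetD acc (k : Int) v = acc.set k v := PySem.List.pySetD_natCast acc k v
      rw [hset]
      have hcast : ((k : Int) + 1) = ((k + 1 : Nat) : Int) := by push_cast; ring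
      rw [hcast, ih (k + 1) (acc.set k v) (by simp at hk ⊢; omega)]
      rw [List.set_eq_take_append_cons_drop, if_pos hklen]
      have h1 : (acc.take k ++ v :: acc.drop (k + 1)).take (k + 1) = acc.take k ++ [v] := by
        rw [List.take_append]
        have : (acc.take k).length = k := List.length_take_of_le (by omega)
        rw [this]
        simp
      have h2 : ∀ m, (acc.take k ++ v :: acc.drop (k + 1)).drop (k + 1 + m) = acc.drop (k + 1 + m) := by
        intro m
        rw [List.drop_append]
        have : (acc.take k).length = k := List.length_take_of_le (by omega)
        rw [this]
        have : (k + 1 + m - k) = m + 1 := by omega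
        simp [this]
        omega
      rw [h1, h2 c'.length]
      have h3 : k + 1 + c'.length = k + (v :: c').length := by simp; omega
      rw [h3]
      simp

theorem enumerate_add : ∀ (c : List Int) (s t : Int),
    PySem.List.enumerate c (s + t) = (PySem.List.enumerate c s).map (fun p => (p.1 + t, p.2)) := by
  intro c
  induction c with
  | nil => intro s t; simp [PySem.List.enumerate_nil]
  | cons x xs ih =>
      intro s t
      rw [PySem.List.enumerate_cons, PySem.List.enumerate_cons, List.map_cons]
      have h : s + t + 1 = (s + 1) + t := by ring
      rw [h, ih]

theorem prefix_fold : ∀ (ps : List (Int × Int)) (g : Int → Int) (a b : List Int),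
    (∀ p ∈ ps, 0 ≤ g p.1 ∧ (g p.1).toNat < a.length) →
    ps.foldl (fun o iv => PySem.List.pySetD o (g iv.1) iv.2) (a ++ b)
      = ps.foldl (fun o iv => PySem.List.pySetD o (g iv.1) iv.2) a ++ b := by
  intro ps
  induction ps with
  | nil => intro g a b _; simp
  | cons p ps' ih =>
      intro g a b hb
      have hp := hb p (by simp)
      rw [List.foldl_cons, List.foldl_cons,
          PySem.List.pySetD_of_nonneg _ _ hp.1, PySem.List.pySetD_of_nonneg _ _ hp.1,
          List.set_append, if_pos hp.2]
      exact ih g _ b (by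
        intro q hq
        have := hb q (by simp [hq])
        simpa using this)

theorem B_small (data : List Int) (h : data.length ≤ 8) : data_reverse_alt data = data := by
  unfold data_reverse_alt
  rw [PySem.List.foldl_congr_mem _ _ (fun o iv => PySem.List.pySetD o iv.1 iv.2) _ (by
    intro acc p hp
    obtain ⟨k, hk, rfl⟩ := (PySem.List.mem_enumerate_iff data 0 p).mp hp
    simp only
    congr 1
    rw [PySem.Int.floordiv_eq_ediv_of_pos (by norm_num), PySem.Int.mod_eq_emod_of_pos (by norm_num)]
    omega)]
  have hs := setSeq data 0 (List.replicate data.length 0) (by simp)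
  simp only [Nat.cast_zero, List.take_zero, List.nil_append, Nat.zero_add] at hs
  rw [hs]
  simp

theorem B_step (data : List Int) (h : 8 < data.length) :
    data_reverse_alt data = data_reverse_alt (data.drop 8) ++ data.take 8 := by
  have hsplit : data.take 8 ++ data.drop 8 = data := List.take_append_drop 8 data
  have hcl : (data.take 8).length = 8 := by simp; omega
  have hrl : (data.drop 8).length = data.length - 8 := by simp
  unfold data_reverse_alt
  simp only
  rw [show PySem.List.enumerate data 0 = PySem.List.enumerate (data.take 8 ++ data.drop 8) 0 from by rw [hsplit],
      PySem.List.enumerate_append, List.foldl_append, hcl]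
  -- phase 1: the first chunk is written to the last 8 slots
  rw [PySem.List.foldl_congr_mem (PySem.List.enumerate (data.take 8) 0) _
        (fun o iv => PySem.List.pySetD o (iv.1 + ((data.length - 8 : Nat) : Int)) iv.2) _ (by
    intro acc p hp
    obtain ⟨k, hk, rfl⟩ := (PySem.List.mem_enumerate_iff _ 0 p).mp hp
    simp only
    congr 1
    rw [PySem.Int.floordiv_eq_ediv_of_pos (by norm_num), PySem.Int.mod_eq_emod_of_pos (by norm_num)]
    rw [hcl] at hk
    omega)]
  have h4 : (PySem.List.enumerate (data.take 8) 0).foldl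
      (fun o iv => PySem.List.pySetD o (iv.1 + ((data.length - 8 : Nat) : Int)) iv.2)
      (List.replicate data.length 0)
      = (PySem.List.enumerate (data.take 8) ((data.length - 8 : Nat) : Int)).foldl
          (fun o iv => PySem.List.pySetD o iv.1 iv.2) (List.replicate data.length 0) := by
    conv_rhs => rw [show ((data.length - 8 : Nat) : Int) = 0 + ((data.length - 8 : Nat) : Int) from (zero_add _).symm,
                    enumerate_add, List.foldl_map]
  rw [h4, setSeq _ _ _ (by simp [hcl]; omega), hcl]
  have h5 : (List.replicate data.length (0:Int)).take (data.length - 8) ++ data.take 8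
        ++ (List.replicate data.length (0:Int)).drop (data.length - 8 + 8)
      = List.replicate (data.length - 8) 0 ++ data.take 8 := by
    rw [List.take_replicate, List.drop_replicate]
    have e1 : min (data.length - 8) data.length = data.length - 8 := by omega
    have e2 : data.length - (data.length - 8 + 8) = 0 := by omega
    rw [e1, e2]
    simp
  rw [h5]
  -- phase 2: the tail is written, shifted by 8, entirely inside the first n-8 slots
  rw [enumerate_add, List.foldl_map]
  simp only
  rw [PySem.List.foldl_congr_mem (PySem.List.enumerate (data.drop 8) 0) _
        (fun o iv => PySem.List.pySetD o
          (((data.drop 8).length : Int) - min ((data.drop 8).length : Int)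
              (PySem.Int.floordiv iv.1 8 * 8 + 8) + PySem.Int.mod iv.1 8) iv.2) _ (by
    intro acc p hp
    obtain ⟨k, hk, rfl⟩ := (PySem.List.mem_enumerate_iff _ 0 p).mp hp
    simp only
    congr 1
    rw [PySem.Int.floordiv_eq_ediv_of_pos (by norm_num), PySem.Int.mod_eq_emod_of_pos (by norm_num),
        PySem.Int.floordiv_eq_ediv_of_pos (by norm_num), PySem.Int.mod_eq_emod_of_pos (by norm_num)]
    rw [hrl] at hk ⊢
    omega)]
  rw [prefix_fold (PySem.List.enumerate (data.drop 8) 0)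
      (fun i => ((data.drop 8).length : Int) - min ((data.drop 8).length : Int)
        (PySem.Int.floordiv i 8 * 8 + 8) + PySem.Int.mod i 8)
      (List.replicate (data.length - 8) 0) (data.take 8) (by
    intro p hp
    obtain ⟨k, hk, rfl⟩ := (PySem.List.mem_enumerate_iff _ 0 p).mp hp
    simp only [List.length_replicate]
    rw [PySem.Int.floordiv_eq_ediv_of_pos (by norm_num), PySem.Int.mod_eq_emod_of_pos (by norm_num)]
    rw [hrl] at hk ⊢
    constructor
    · omega
    · omega)]
  congr 1
  rw [hrl]

theorem B_char : ∀ (fuel : Nat) (data : List Int), data.length ≤ fuel →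
    data_reverse_alt data = (chunks data).reverse.flatten := by
  intro fuel
  induction fuel with
  | zero =>
      intro data h
      have hd : data = [] := List.length_eq_zero_iff.mp (by omega)
      subst hd
      rw [B_small [] (by simp)]
      simp [chunks]
  | succ fuel ih =>
      intro data h
      by_cases h8 : data.length ≤ 8
      · rw [B_small data h8]
        by_cases hnil : data = []
        · subst hnil; simp [chunks]
        · rw [chunks, dif_neg hnil]
          have : data.drop 8 = [] := List.drop_eq_nil_of_le h8
          rw [this]
          simp [chunks, List.take_of_length_le h8]
      · push_neg at h8
        rw [B_step data h8]
        have hnil : data ≠ [] := by intro hc; subst hc; simp at h8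
        rw [chunks, dif_neg hnil]
        have hr : (data.drop 8).length ≤ fuel := by simp; omega
        rw [ih (data.drop 8) hr]
        simp

-- ===== VERDICT (by name: the statement is the Claim_ definition above) =====
theorem data_reverse_spec : Claim_equal_data_reverse := by
  intro data _
  show data_reverse data = data_reverse_alt data
  unfold data_reverse
  simp only
  rw [foldl_append_singleton, foldl_append_self, List.nil_append, List.nil_append,
      mapSlices data.length data le_rfl, B_char data.length data le_rfl]
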